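-- pv_equiv track=rewrite | github.com/CamiloCastiblanco/AYED-AYPR | AYED/AYED 2020-1/parentesis.py | nuevas
-- ===== SOURCE A (Python) =====
-- def nuevas(listap):
--     listaparder = []
--     listaparizq = []
--     listacorder = []
--     listacorizq = []
--     listap = list(listap)
--     for i in range(len(listap)):
--         if listap[i] == '(':
--             listaparder += listap[i]
--         elif listap[i] == ')':
--             listaparizq += listap[i]
--         elif listap[i] == '[':
--             listacorder += listap[i]
--         elif listap[i] == ']':
--             listacorizq += listap[i]
--     a = len(listaparder) == len(listaparizq)
--     b = len(listacorizq) == len(listacorder)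
--     if a and b:
--         return 'Yes'
--     else:
--         return 'No'
-- ===== SOURCE B (Python) =====
-- def nuevas(listap):
--     listap = list(listap)
--
--     def cancel(s, o, c):
--         # pair-cancellation: repeatedly delete one opener and one closer
--         while o in s and c in s:
--             s.remove(o)
--             s.remove(c)
--         return o not in s and c not in s
--
--     a = cancel(list(listap), '(', ')')
--     b = cancel(list(listap), '[', ']')
--     return 'Yes' if a and b else 'No'
-- ===== Notes on version B (the rewrite author's own statement) =====
-- stated objective: alternative
-- what changed: Replaced the single bucketing pass that builds four character lists with a pair-cancellation loop that repeatedly removes one matching opener and one closer until a side is exhausted, answering Yes iff both sides exhaust simultaneously for both bracket kinds.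
import Mathlib
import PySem

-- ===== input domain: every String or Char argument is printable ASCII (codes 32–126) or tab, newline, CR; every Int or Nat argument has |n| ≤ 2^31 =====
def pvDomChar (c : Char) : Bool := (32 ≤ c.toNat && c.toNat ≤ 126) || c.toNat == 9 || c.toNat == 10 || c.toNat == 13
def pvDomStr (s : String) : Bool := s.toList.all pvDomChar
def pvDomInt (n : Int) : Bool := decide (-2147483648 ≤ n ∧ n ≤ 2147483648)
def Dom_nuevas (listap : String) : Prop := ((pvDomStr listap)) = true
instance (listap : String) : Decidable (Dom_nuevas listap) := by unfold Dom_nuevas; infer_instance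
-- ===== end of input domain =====

-- ===== PORT A =====
-- One honest line: B answers by pair-cancellation (repeatedly deleting a matching opener/closer pair) instead of A's one bucketing pass; same value, not faster.
def nuevas (listap : String) : String :=
  let st := listap.toList.foldl
    (fun (st : List Char × List Char × List Char × List Char) c =>
      if c = '(' then (st.1 ++ [c], st.2.1, st.2.2.1, st.2.2.2)
      else if c = ')' then (st.1, st.2.1 ++ [c], st.2.2.1, st.2.2.2)
      else if c = '[' then (st.1, st.2.1, st.2.2.1 ++ [c], st.2.2.2)
      else if c = ']' then (st.1, st.2.1, st.2.2.1, st.2.2.2 ++ [c])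
      else st)
    ([], [], [], [])
  let a := st.1.length == st.2.1.length
  let b := st.2.2.2.length == st.2.2.1.length
  if a && b then "Yes" else "No"

-- ===== PORT B =====
-- Python's list.remove deletes the first occurrence; inside the loop both characters are
-- present (the guard), so List.erase is exact here.
def pvCancel (s : List Char) (o c : Char) : Bool :=
  if h : o ∈ s ∧ c ∈ s then pvCancel ((s.erase o).erase c) o c
  else !(s.contains o) && !(s.contains c)
termination_by s.length
decreasing_by
  calc ((s.erase o).erase c).length ≤ (s.erase o).length := List.length_erase_le
    _ < s.length := by
        rw [List.length_erase_of_mem h.1]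
        exact Nat.sub_lt (List.length_pos_of_mem h.1) Nat.one_pos

def nuevas_alt (listap : String) : String :=
  let l := listap.toList
  let a := pvCancel l '(' ')'
  let b := pvCancel l '[' ']'
  if a && b then "Yes" else "No"

-- ===== PRECONDITION & SPEC =====
def Spec_nuevas (listap : String) (out : String) : Prop := out = nuevas_alt listap
instance (listap : String) (out : String) : Decidable (Spec_nuevas listap out) := by unfold Spec_nuevas; infer_instance

-- ===== CLAIM (what is proved, stated in full; the proofs are below) =====
def Claim_equal_nuevas : Prop := ∀ (listap : String), Dom_nuevas listap → Spec_nuevas listap (nuevas listap)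

-- ===== LEMMAS AND PROOFS =====

theorem nuevas_loop_len (cs : List Char) (s : List Char × List Char × List Char × List Char) :
    (let r := cs.foldl
      (fun (st : List Char × List Char × List Char × List Char) c =>
        if c = '(' then (st.1 ++ [c], st.2.1, st.2.2.1, st.2.2.2)
        else if c = ')' then (st.1, st.2.1 ++ [c], st.2.2.1, st.2.2.2)
        else if c = '[' then (st.1, st.2.1, st.2.2.1 ++ [c], st.2.2.2)
        else if c = ']' then (st.1, st.2.1, st.2.2.1, st.2.2.2 ++ [c])
        else st) s
     r.1.length = s.1.length + cs.count '(' ∧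
     r.2.1.length = s.2.1.length + cs.count ')' ∧
     r.2.2.1.length = s.2.2.1.length + cs.count '[' ∧
     r.2.2.2.length = s.2.2.2.length + cs.count ']') := by
  induction cs generalizing s with
  | nil => simp
  | cons c cs ih =>
    simp only [List.foldl_cons, List.count_cons]
    by_cases h1 : c = '('
    · have := ih (s.1 ++ [c], s.2.1, s.2.2.1, s.2.2.2)
      simp_all; omega
    · by_cases h2 : c = ')'
      · have := ih (s.1, s.2.1 ++ [c], s.2.2.1, s.2.2.2)
        simp_all; omega
      · by_cases h3 : c = '['
        · have := ih (s.1, s.2.1, s.2.2.1 ++ [c], s.2.2.2)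
          simp_all; omega
        · by_cases h4 : c = ']'
          · have := ih (s.1, s.2.1, s.2.2.1, s.2.2.2 ++ [c])
            simp_all; omega
          · have := ih s
            simp_all

-- pair-cancellation terminates with both sides exhausted iff the two counts were equal
theorem pvCancel_eq_count (s : List Char) (o c : Char) (hoc : o ≠ c) :
    pvCancel s o c = (s.count o == s.count c) := by
  induction s using pvCancel.induct o c with
  | case1 s h ih =>
    rw [pvCancel, dif_pos h, ih]
    have ho : ((s.erase o).erase c).count o = s.count o - 1 := by
      rw [List.count_erase_of_ne hoc, List.count_erase_self]
    have hc : ((s.erase o).erase c).count c = s.count c - 1 := by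
      rw [List.count_erase_self, List.count_erase_of_ne hoc.symm]
    have hpo : 0 < s.count o := List.count_pos_iff.mpr h.1
    have hpc : 0 < s.count c := List.count_pos_iff.mpr h.2
    rw [ho, hc]
    cases Nat.decEq (s.count o) (s.count c) with
    | isTrue he => simp [he]
    | isFalse he => simp [he]; omega
  | case2 s h =>
    rw [pvCancel, dif_neg h]
    by_cases ho : o ∈ s
    · have hc : c ∉ s := fun hc => h ⟨ho, hc⟩
      have : s.count c = 0 := List.count_eq_zero_of_not_mem hc
      have hpo : 0 < s.count o := List.count_pos_iff.mpr ho
      simp [ho, this]; omega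
    · have h0 : s.count o = 0 := List.count_eq_zero_of_not_mem ho
      by_cases hc : c ∈ s
      · have hpc : 0 < s.count c := List.count_pos_iff.mpr hc
        simp [ho, hc, h0]; omega
      · have h0c : s.count c = 0 := List.count_eq_zero_of_not_mem hc
        simp [ho, hc, h0, h0c]

-- ===== VERDICT (by name: the statement is the Claim_ definition above) =====
theorem nuevas_spec : Claim_equal_nuevas := by
  intro listap _
  unfold Spec_nuevas nuevas nuevas_alt
  have h := nuevas_loop_len listap.toList ([], [], [], [])
  simp only [List.length_nil, Nat.zero_add] at h
  obtain ⟨h1, h2, h3, h4⟩ := h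
  have ha := pvCancel_eq_count listap.toList '(' ')' (by decide)
  have hb := pvCancel_eq_count listap.toList '[' ']' (by decide)
  have e : ∀ m n : ℕ, (n == m) = (m == n) := by
    intro m n
    cases Nat.decEq m n with
    | isTrue h => simp [h]
    | isFalse h => simp [h, Ne.symm h]
  simp only [ha, hb, h1, h2, h3, h4,
    e (listap.toList.count '[') (listap.toList.count ']')]
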